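-- pv_equiv track=rewrite | github.com/hewzhew/sts-sim | scripts/play_ui.py | pick_noncombat
-- ===== SOURCE A (Python) =====
-- def pick_noncombat(valid, screen):
--     for a in [99, 39, 34, 35, 36]:
--         if a in valid: return a
--     for a in range(30, 34):
--         if a in valid: return a
--     for a in range(20, 30):
--         if a in valid: return a
--     for a in [60, 61, 62, 63, 64, 65]:
--         if a in valid: return a
--     for a in range(90, 100):
--         if a in valid: return a
--     return valid[0] if valid else 99
-- ===== SOURCE B (Python) =====
-- # One rank table built once; a single pass over `valid` keeps the element of
-- # smallest rank, instead of rescanning `valid` for each candidate priority.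
-- _PRIORITY = [99, 39, 34, 35, 36, *range(30, 34), *range(20, 30),
--              60, 61, 62, 63, 64, 65, *range(90, 100)]
-- _RANK = {}
-- for _i, _v in enumerate(_PRIORITY):
--     _RANK.setdefault(_v, _i)
--
-- def pick_noncombat(valid, screen):
--     best = None  # (rank, value) of the best prioritized element seen so far
--     for x in valid:
--         r = _RANK.get(x)
--         if r is not None and (best is None or r < best[0]):
--             best = (r, x)
--     if best is not None:
--         return best[1]
--     return valid[0] if valid else 99
-- ===== Notes on version B (the rewrite author's own statement) =====
-- stated objective: faster
-- what changed: Instead of rescanning `valid` once per candidate priority (five constant lists/ranges in order), B builds a priority->rank table once at module load and makes a single pass over `valid`, keeping the element of minimum rank; the fallback (`valid[0]` if non-empty else 99) is unchanged.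
import Mathlib
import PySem

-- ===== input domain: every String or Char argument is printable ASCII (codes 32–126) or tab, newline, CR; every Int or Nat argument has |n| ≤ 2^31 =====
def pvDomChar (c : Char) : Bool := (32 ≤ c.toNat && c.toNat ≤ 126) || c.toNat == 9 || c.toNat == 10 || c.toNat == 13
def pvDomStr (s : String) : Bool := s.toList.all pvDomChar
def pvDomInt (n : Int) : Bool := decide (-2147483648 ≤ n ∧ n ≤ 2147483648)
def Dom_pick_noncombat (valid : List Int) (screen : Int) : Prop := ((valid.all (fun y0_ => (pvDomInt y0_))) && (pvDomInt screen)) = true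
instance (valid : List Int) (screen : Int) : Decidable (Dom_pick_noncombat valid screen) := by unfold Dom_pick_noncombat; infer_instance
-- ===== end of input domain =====

-- B replaces A's five rescans of `valid` (one per candidate priority) by a rank
-- table built once and a single pass over `valid` keeping the minimum-rank element.

-- ===== PORT A =====
-- each 'for a in L: if a in valid: return a' loop is L.find? (fun a => valid.contains a)
def pick_noncombat (valid : List Int) (screen : Int) : Int :=
  match ([99, 39, 34, 35, 36] : List Int).find? (fun a => valid.contains a) with
  | some a => a
  | none =>
  match (PySem.List.pyRange 30 34 1).find? (fun a => valid.contains a) with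
  | some a => a
  | none =>
  match (PySem.List.pyRange 20 30 1).find? (fun a => valid.contains a) with
  | some a => a
  | none =>
  match ([60, 61, 62, 63, 64, 65] : List Int).find? (fun a => valid.contains a) with
  | some a => a
  | none =>
  match (PySem.List.pyRange 90 100 1).find? (fun a => valid.contains a) with
  | some a => a
  | none => match valid with | [] => 99 | x :: _ => x

-- ===== PORT B =====
def prioList : List Int :=
  [99, 39, 34, 35, 36] ++ PySem.List.pyRange 30 34 1 ++ PySem.List.pyRange 20 30 1
    ++ [60, 61, 62, 63, 64, 65] ++ PySem.List.pyRange 90 100 1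

def rankDict : PySem.Dict Int Int :=
  (PySem.List.enumerate prioList).foldl (fun d p => d.setdefault p.2 p.1) PySem.Dict.empty

-- loop body: update (rank, value) of best prioritized element seen so far
def stepB (b : Option (Int × Int)) (x : Int) : Option (Int × Int) :=
  match rankDict.get? x with
  | some r =>
    match b with
    | none => some (r, x)
    | some (br, bv) => if r < br then some (r, x) else some (br, bv)
  | none => b

def pick_noncombat_alt (valid : List Int) (screen : Int) : Int :=
  let best := valid.foldl stepB none
  match best with
  | some (_, v) => v
  | none => match valid with | [] => 99 | x :: _ => x

-- ===== PRECONDITION & SPEC =====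
def Spec_pick_noncombat (valid : List Int) (screen : Int) (out : Int) : Prop := out = pick_noncombat_alt valid screen
instance (valid : List Int) (screen : Int) (out : Int) : Decidable (Spec_pick_noncombat valid screen out) := by unfold Spec_pick_noncombat; infer_instance

-- ===== CLAIM (what is proved, stated in full; the proofs are below) =====
def Claim_equal_pick_noncombat : Prop := ∀ (valid : List Int) (screen : Int), Dom_pick_noncombat valid screen → Spec_pick_noncombat valid screen (pick_noncombat valid screen)

-- ===== LEMMAS AND PROOFS =====

-- rank function the proofs reason with: first index of x in prioList
def rk (x : Int) : Option Nat := PySem.List.index? prioList x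

-- the abstract loop B's fold tracks, on bare ranks
def stepN (b : Option Nat) (x : Int) : Option Nat :=
  match rk x, b with
  | none, b => b
  | some m, none => some m
  | some m, some n => some (if m < n then m else n)

-- setdefault is 'insert if absent'
lemma setdefault_eq (d : PySem.Dict Int Int) (k v : Int) :
    d.setdefault k v = if d.contains k then d else d.insert k v := by
  by_cases h : d.contains k
  · simp [PySem.Dict.setdefault, h]
  · simp only [PySem.Dict.setdefault, h, if_false, Bool.false_eq_true]
    apply PySem.Dict.ext
    rw [PySem.Dict.items_insert_of_not_contains _ _ (by simpa using h)]

-- the dict built by the setdefault loop answers exactly 'first index in the enumerated list'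
lemma get?_foldl_setdefault (l : List Int) (s : Int) (d : PySem.Dict Int Int) (x : Int) :
    ((PySem.List.enumerate l s).foldl (fun d p => d.setdefault p.2 p.1) d).get? x
      = (d.get? x).or ((PySem.List.index? l x).map (fun n => s + Int.ofNat n)) := by
  induction l generalizing s d with
  | nil => simp [PySem.List.enumerate_nil, PySem.List.index?_eq_idxOf?]
  | cons a l ih =>
    rw [PySem.List.enumerate_cons, List.foldl_cons, ih]
    simp only [PySem.List.index?_eq_idxOf?, List.idxOf?_cons]
    rw [setdefault_eq]
    by_cases hxa : a = x
    · subst hxa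
      cases hw : d.get? a with
      | some w =>
        have hcf : d.contains a = true := by rw [PySem.Dict.contains_eq_isSome_get?, hw]; rfl
        simp [hcf, hw]
      | none =>
        have hcf : d.contains a = false := by rw [PySem.Dict.contains_eq_isSome_get?, hw]; rfl
        simp [hcf]
    · have hsd : ∀ d' : PySem.Dict Int Int, (d'.setdefault a s).get? x = d'.get? x := by
        intro d'
        rw [setdefault_eq]
        by_cases hc : d'.contains a
        · simp [hc]
        · simp [hc, PySem.Dict.get?_insert, Ne.symm hxa]
      rw [← setdefault_eq, hsd]
      have hba : (a == x) = false := by simp [hxa]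
      rw [hba]
      simp only [Bool.false_eq_true, if_false, Option.map_map]
      congr 2
      funext n
      simp only [Function.comp_apply, Int.ofNat_eq_natCast]
      push_cast
      ring

lemma rankDict_get? (x : Int) : rankDict.get? x = (rk x).map (fun n => Int.ofNat n) := by
  rw [rankDict, rk, get?_foldl_setdefault]
  simp [PySem.Dict.get?_empty]

-- index? = some m pins the element at position m
lemma rk_getElem? (x : Int) (m : Nat) (h : rk x = some m) : prioList[m]? = some x := by
  rw [rk] at h
  obtain ⟨pre, suf, hdec, hlen, -⟩ := (PySem.List.index?_eq_some_iff prioList x m).mp h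
  subst hlen
  rw [hdec, List.getElem?_append_right (le_refl _)]
  simp

-- the rank of an element sitting at position j is at most j
lemma rk_le_of_getElem (j : Nat) (hj : j < prioList.length) (k : Nat)
    (h : rk prioList[j] = some k) : k ≤ j := by
  rw [rk] at h
  obtain ⟨pre, suf, hdec, hlen, hnm⟩ := (PySem.List.index?_eq_some_iff prioList prioList[j] k).mp h
  by_contra hlt
  apply hnm
  have hjp : j < pre.length := by omega
  have e2 : prioList[j]? = some prioList[j] := List.getElem?_eq_getElem hj
  have e1 : prioList[j]? = pre[j]? := by rw [hdec]; exact List.getElem?_append_left hjp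
  have e3 : pre[j]? = some pre[j] := List.getElem?_eq_getElem hjp
  rw [e1, e3] at e2
  rw [show prioList[j] = pre[j] from (Option.some_inj.mp e2).symm]
  exact List.getElem_mem hjp

-- one step of B's fold is one step of stepN under the encoding
lemma stepB_enc (b : Option Nat) (x : Int) :
    stepB (b.map (fun n => (Int.ofNat n, prioList.getD n 0))) x
      = (stepN b x).map (fun n => (Int.ofNat n, prioList.getD n 0)) := by
  cases hr : rk x with
  | none =>
    have hg : rankDict.get? x = none := by rw [rankDict_get?, hr]; rfl
    cases b <;> simp [stepB, stepN, hg, hr]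
  | some m =>
    have hg : rankDict.get? x = some (Int.ofNat m) := by rw [rankDict_get?, hr]; rfl
    cases b with
    | none => simp [stepB, stepN, hg, hr, rk_getElem? x m hr]
    | some n =>
      by_cases hmn : m < n <;>
        simp [stepB, stepN, hg, hr, rk_getElem? x m hr, hmn]

-- B's fold is stepN under the encoding  some n ↦ some (↑n, prioList[n])
lemma fold_enc (valid : List Int) (b : Option Nat) :
    valid.foldl stepB (b.map (fun n => (Int.ofNat n, prioList.getD n 0)))
      = (valid.foldl stepN b).map (fun n => (Int.ofNat n, prioList.getD n 0)) := by
  induction valid generalizing b with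
  | nil => rfl
  | cons x l ih => rw [List.foldl_cons, List.foldl_cons, stepB_enc, ih]

-- characterisation of the stepN fold
lemma foldl_stepN_eq_none (valid : List Int) (b : Option Nat) :
    valid.foldl stepN b = none ↔ b = none ∧ ∀ x ∈ valid, rk x = none := by
  induction valid generalizing b with
  | nil => simp
  | cons x l ih =>
    rw [List.foldl_cons, ih]
    cases hr : rk x with
    | none => cases b <;> simp [stepN, hr]
    | some m => cases b <;> simp [stepN, hr]

lemma stepN_char (b : Option Nat) (x : Int) (m : Nat) (h : stepN b x = some m) :
    b = some m ∨ rk x = some m := by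
  cases hr : rk x with
  | none => simp only [stepN, hr] at h; cases b <;> simp_all
  | some j =>
    cases b with
    | none => simp only [stepN, hr] at h; simp_all
    | some n => simp only [stepN, hr] at h; split at h <;> simp_all

lemma foldl_stepN_eq_some (valid : List Int) (b : Option Nat) (m : Nat)
    (h : valid.foldl stepN b = some m) :
    (b = some m ∨ ∃ x ∈ valid, rk x = some m) ∧
      (∀ x ∈ valid, ∀ j, rk x = some j → m ≤ j) ∧
      (∀ n, b = some n → m ≤ n) := by
  induction valid generalizing b with
  | nil =>
    simp only [List.foldl_nil] at h
    exact ⟨Or.inl h, by simp, fun n hn => by rw [h] at hn; injection hn with e; omega⟩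
  | cons x l ih =>
    rw [List.foldl_cons] at h
    obtain ⟨h1, h2, h3⟩ := ih (stepN b x) h
    refine ⟨?_, ?_, ?_⟩
    · rcases h1 with hs | ⟨y, hyl, hym⟩
      · rcases stepN_char b x m hs with hb | hrx
        · exact Or.inl hb
        · exact Or.inr ⟨x, List.mem_cons_self, hrx⟩
      · exact Or.inr ⟨y, List.mem_cons_of_mem _ hyl, hym⟩
    · intro y hy j hj
      rcases List.mem_cons.mp hy with rfl | hyl
      · have hex : ∃ k, stepN b y = some k ∧ k ≤ j := by
          cases b with
          | none => exact ⟨j, by simp [stepN, hj], le_refl _⟩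
          | some n => exact ⟨if j < n then j else n, by simp [stepN, hj], by split <;> omega⟩
        obtain ⟨k, hk, hkj⟩ := hex
        exact le_trans (h3 k hk) hkj
      · exact h2 y hyl j hj
    · intro n hb
      have hex : ∃ k, stepN b x = some k ∧ k ≤ n := by
        cases hr : rk x with
        | none => exact ⟨n, by simp [stepN, hr, hb], le_refl _⟩
        | some j => exact ⟨if j < n then j else n, by simp [stepN, hr, hb], by split <;> omega⟩
      obtain ⟨k, hk, hkn⟩ := hex
      exact le_trans (h3 k hk) hkn

-- A is the first element of prioList that lies in valid, else the fallback
lemma A_char (valid : List Int) (screen : Int) :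
    pick_noncombat valid screen
      = match prioList.find? (fun a => valid.contains a) with
        | some a => a
        | none => match valid with | [] => 99 | x :: _ => x := by
  cases h1 : ([99, 39, 34, 35, 36] : List Int).find? (fun a => valid.contains a) <;>
    cases h2 : (PySem.List.pyRange 30 34 1).find? (fun a => valid.contains a) <;>
      cases h3 : (PySem.List.pyRange 20 30 1).find? (fun a => valid.contains a) <;>
        cases h4 : (([60, 61, 62, 63, 64, 65] : List Int)).find? (fun a => valid.contains a) <;>
          cases h5 : (PySem.List.pyRange 90 100 1).find? (fun a => valid.contains a) <;>
            (simp only [pick_noncombat, prioList, List.find?_append, h1, h2, h3, h4, h5,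
              Option.some_or, Option.none_or]; try rfl)

-- the two searches coincide
lemma find?_eq_fold (valid : List Int) :
    prioList.find? (fun a => valid.contains a)
      = (valid.foldl stepN none).map (fun n => prioList.getD n 0) := by
  cases h : valid.foldl stepN none with
  | none =>
    have hall := ((foldl_stepN_eq_none valid none).mp h).2
    rw [Option.map_none, List.find?_eq_none]
    intro a ha
    simp only [Bool.not_eq_true]
    cases hc : valid.contains a with
    | false => rfl
    | true =>
      have hav : a ∈ valid := List.contains_iff_mem.mp hc
      have : a ∉ prioList := (PySem.List.index?_eq_none_iff prioList a).mp (hall a hav)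
      exact absurd ha this
  | some m =>
    obtain ⟨h1, h2, -⟩ := foldl_stepN_eq_some valid none m h
    have hx : ∃ x ∈ valid, rk x = some m := by
      rcases h1 with h1 | h1
      · exact absurd h1 (by simp)
      · exact h1
    obtain ⟨x, hxv, hxm⟩ := hx
    have hg : prioList[m]? = some x := rk_getElem? x m hxm
    obtain ⟨hmlt, hxe⟩ := List.getElem?_eq_some_iff.mp hg
    have hgd : prioList.getD m 0 = x := by
      rw [List.getD_eq_getElem?_getD, hg]; rfl
    rw [Option.map_some, List.find?_eq_some_iff_getElem]
    refine ⟨?_, m, hmlt, ?_, ?_⟩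
    · rw [hgd]; exact List.contains_iff_mem.mpr hxv
    · rw [hxe, hgd]
    · intro j hj
      cases hc : valid.contains prioList[j] with
      | false => simp
      | true =>
        exfalso
        have hjv : prioList[j] ∈ valid := List.contains_iff_mem.mp hc
        have hjp : prioList[j] ∈ prioList := List.getElem_mem _
        obtain ⟨k, hk⟩ := Option.isSome_iff_exists.mp
          ((PySem.List.index?_isSome_iff prioList prioList[j]).mpr hjp)
        have hmk : m ≤ k := h2 _ hjv k hk
        have hkj : k ≤ j := rk_le_of_getElem j (by omega) k hk
        omega

-- ===== VERDICT (by name: the statement is the Claim_ definition above) =====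
theorem pick_noncombat_spec : Claim_equal_pick_noncombat := by
  intro valid screen _
  show pick_noncombat valid screen = pick_noncombat_alt valid screen
  have hf := fold_enc valid none
  simp only [Option.map_none] at hf
  rw [A_char, find?_eq_fold]
  simp only [pick_noncombat_alt, hf]
  cases valid.foldl stepN none with
  | none => rfl
  | some m => rfl
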